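-- pv_equiv track=rewrite | github.com/timointhebush/AlgorithmStudy | programmers/커뮤러닝7기/step1-2.py | solution
-- ===== SOURCE A (Python) =====
-- RED = 1
--
-- def solution(bell):
--     for i in range(len(bell)):
--         if bell[i] == RED:
--             bell[i] = -1
--         else:
--             bell[i] = 1
--
--     new_bell = [0 for _ in range(len(bell))]
--     new_bell[0] = bell[0]
--
--     for i in range(1, len(bell)):
--         new_bell[i] = new_bell[i - 1] + bell[i]
--
--     min_idx, max_idx = 0, 0
--     for i in range(len(bell)):
--         if new_bell[i] == 0:
--             min_idx = min(min_idx, i)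
--             max_idx = max(max_idx, i)
--
--     return max_idx - min_idx
-- ===== SOURCE B (Python) =====
-- RED = 1
--
-- def solution(bell):
--     # map in place exactly as A does (same observable mutation of the argument)
--     for i in range(len(bell)):
--         bell[i] = -1 if bell[i] == RED else 1
--     s = bell[0]          # IndexError on empty input, like A
--     last = 0
--     for i in range(1, len(bell)):
--         s += bell[i]
--         if s == 0:
--             last = i
--     return last
-- ===== Notes on version B (the rewrite author's own statement) =====
-- stated objective: simpler
-- what changed: B drops A's intermediate prefix-sum array and the min/max scan: a single running-sum pass records the last index where the prefix sum is zero (the minimum zero index is provably always 0, so the answer is just that last index).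
import Mathlib
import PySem

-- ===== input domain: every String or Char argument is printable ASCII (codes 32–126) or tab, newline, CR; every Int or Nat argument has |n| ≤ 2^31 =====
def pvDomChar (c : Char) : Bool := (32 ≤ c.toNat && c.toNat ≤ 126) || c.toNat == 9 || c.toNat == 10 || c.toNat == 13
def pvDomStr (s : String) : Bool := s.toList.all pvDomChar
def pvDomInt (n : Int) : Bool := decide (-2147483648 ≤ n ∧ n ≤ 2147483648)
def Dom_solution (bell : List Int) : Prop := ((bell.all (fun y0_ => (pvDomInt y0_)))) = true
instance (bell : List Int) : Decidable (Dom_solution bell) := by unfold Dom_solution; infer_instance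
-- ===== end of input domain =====

-- B fuses A's three passes into one running-sum pass without the prefix array or the
-- min/max scan (objective: simpler; return-value equivalence — both mutate bell the same way).

-- ===== PORT A =====
def solution (bell : List Int) : Int :=
  let bell1 := bell.map (fun x => if x = 1 then (-1 : Int) else 1)
  match bell1 with
  | [] => 0   -- Python raises IndexError here (new_bell[0]); excluded by Pre_solution
  | h :: t =>
    let newBell := (t.foldl (fun (acc : List Int × Int) x =>
        (acc.1 ++ [acc.2 + x], acc.2 + x)) ([h], h)).1
    let mm := newBell.zipIdx.foldl
        (fun (p : Int × Int) (vi : Int × Nat) =>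
          if vi.1 = 0 then (min p.1 (vi.2 : Int), max p.2 (vi.2 : Int)) else p)
        (0, 0)
    mm.2 - mm.1

-- ===== PORT B =====
def solution_alt (bell : List Int) : Int :=
  let bell1 := bell.map (fun x => if x = 1 then (-1 : Int) else 1)
  match bell1 with
  | [] => 0   -- Python raises IndexError here (bell[0]); excluded by Pre_solution
  | h :: t =>
    ((t.zipIdx 1).foldl
        (fun (p : Int × Int) (xi : Int × Nat) =>
          let s := p.1 + xi.1
          (s, if s = 0 then (xi.2 : Int) else p.2))
        (h, 0)).2

-- ===== PRECONDITION & SPEC =====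
-- Pre_ excludes only the empty list, on which both Pythons raise IndexError.
def Pre_solution (bell : List Int) : Prop := bell ≠ []
instance (bell : List Int) : Decidable (Pre_solution bell) := by unfold Pre_solution; infer_instance
def pvWitness_solution : List Int := [1, 2, 1, 2]

def Spec_solution (bell : List Int) (out : Int) : Prop := out = solution_alt bell
instance (bell : List Int) (out : Int) : Decidable (Spec_solution bell out) := by unfold Spec_solution; infer_instance

-- ===== CLAIM (what is proved, stated in full; the proofs are below) =====
def Claim_equal_solution : Prop := ∀ (bell : List Int), Dom_solution bell → Pre_solution bell → Spec_solution bell (solution bell)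

-- ===== LEMMAS AND PROOFS =====

/-- The prefix sums of `l` continuing from running sum `s` (A's `new_bell` tail). -/
def pvScan (s : Int) : List Int → List Int
  | [] => []
  | x :: xs => (s + x) :: pvScan (s + x) xs

lemma pv_build (t : List Int) : ∀ (init : List Int) (s : Int),
    t.foldl (fun (acc : List Int × Int) x => (acc.1 ++ [acc.2 + x], acc.2 + x)) (init, s)
      = (init ++ pvScan s t, s + t.sum) := by
  induction t with
  | nil => intro init s; simp [pvScan]
  | cons x xs ih =>
      intro init s
      simp [pvScan, List.foldl_cons, ih, List.append_assoc, add_assoc]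

lemma pv_key (l : List Int) : ∀ (k : Nat) (s mx : Int), mx ≤ (k : Int) →
    ((pvScan s l).zipIdx k).foldl
        (fun (p : Int × Int) (vi : Int × Nat) =>
          if vi.1 = 0 then (min p.1 (vi.2 : Int), max p.2 (vi.2 : Int)) else p)
        (0, mx)
      = (0, ((l.zipIdx k).foldl
          (fun (p : Int × Int) (xi : Int × Nat) =>
            let s := p.1 + xi.1
            (s, if s = 0 then (xi.2 : Int) else p.2))
          (s, mx)).2) := by
  induction l with
  | nil => intro k s mx _; simp [pvScan]
  | cons x xs ih =>
      intro k s mx hmx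
      simp only [pvScan, List.zipIdx_cons, List.foldl_cons]
      by_cases h : s + x = 0
      · have hmin : min (0 : Int) (k : Int) = 0 := by
          have : (0 : Int) ≤ (k : Int) := Int.natCast_nonneg k
          omega
        have hmax : max mx (k : Int) = (k : Int) := by omega
        simp only [h, hmin, hmax]
        exact ih (k + 1) 0 (k : Int) (by push_cast; omega)
      · simp only [h]
        exact ih (k + 1) (s + x) mx (by push_cast; omega)

-- ===== VERDICT (by name: the statement is the Claim_ definition above) =====
theorem solution_spec : Claim_equal_solution := by
  intro bell _ hpre
  unfold Spec_solution solution solution_alt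
  cases bell with
  | nil => exact absurd rfl hpre
  | cons y ys =>
      simp only [List.map_cons]
      set h : Int := if y = 1 then (-1 : Int) else 1 with hh
      set t : List Int := ys.map (fun x => if x = 1 then (-1 : Int) else 1) with ht
      have hbuild := pv_build t [h] h
      simp only [hbuild, List.singleton_append, List.zipIdx_cons, List.foldl_cons]
      have hstep : (if h = 0 then (min (0:Int) ((0:Nat) : Int), max (0:Int) ((0:Nat) : Int))
          else ((0:Int), (0:Int))) = ((0:Int), (0:Int)) := by
        by_cases hz : h = 0 <;> simp [hz]
      have hkey := pv_key t 1 h 0 (by norm_num)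
      rw [hstep, hkey]
      simp
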